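-- pv_equiv track=rewrite | github.com/zzz686970/leetcode-2018 | codility/sequence_target.py | solution
-- ===== SOURCE A (Python) =====
-- def solution(N):
-- 	if N == 0 or N == 1: return 0
-- 	number = N
-- 	moves = []
-- 	l, r = 0, 1
-- 	if number <= 0:
-- 		number = -number
-- 	else:
-- 		number -= 1
--
-- 	if N <=0:
-- 		while number != 0:
-- 			if number & 1:
-- 				l = 2 * l - r
-- 				moves.append('L')
-- 			else:
-- 				r = 2 * r - l
-- 				moves.append('R')
--
-- 			number //= 2
-- 	else:
-- 		while number !=0:
-- 			if number & 1:
-- 				r = 2 * r - l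
-- 				moves.append('R')
-- 			else:
-- 				l = 2 * l - r
-- 				moves.append('L')
--
-- 			number //= 2
--
-- 	return len(moves) if moves else -1
-- ===== SOURCE B (Python) =====
-- def solution(N):
--     # closed form: the answer is the bit length of the adjusted magnitude
--     if N <= 0:
--         return (-N).bit_length()
--     return (N - 1).bit_length()
-- ===== Notes on version B (the rewrite author's own statement) =====
-- stated objective: simpler
-- what changed: Replaces the loop that builds an unused L/R move list with a closed-form bit_length of the adjusted magnitude (the negation of N when N is nonpositive, otherwise N minus one); the unreachable branch returning a negative sentinel is dropped.
import Mathlib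
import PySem

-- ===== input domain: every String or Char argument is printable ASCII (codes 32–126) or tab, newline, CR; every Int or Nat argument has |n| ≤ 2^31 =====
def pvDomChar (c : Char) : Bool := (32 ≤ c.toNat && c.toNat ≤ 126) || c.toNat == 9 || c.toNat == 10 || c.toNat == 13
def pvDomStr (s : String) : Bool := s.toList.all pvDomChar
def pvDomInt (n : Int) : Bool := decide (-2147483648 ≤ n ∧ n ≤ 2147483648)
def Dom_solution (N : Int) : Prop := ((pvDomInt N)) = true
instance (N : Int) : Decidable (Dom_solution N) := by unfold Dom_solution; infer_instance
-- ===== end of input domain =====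

-- B replaces A's move-building loop with the closed-form bit length of the adjusted magnitude (simpler).

-- ===== PORT A =====
-- A's while loops run on `number`, which is nonnegative at every entry (it starts as -N ≥ 0
-- or N-1 ≥ 1 and `number //= 2` on a nonnegative value is Nat division), so the loop state
-- `number` is carried as a Nat; l, r and the moves list are carried exactly as in A.
def solLoopNeg (number : Nat) (l r : Int) (moves : List String) : List String :=
  if number = 0 then moves
  else if number % 2 = 1 then solLoopNeg (number / 2) (2 * l - r) r (moves ++ ["L"])
  else solLoopNeg (number / 2) l (2 * r - l) (moves ++ ["R"])
decreasing_by all_goals exact Nat.div_lt_self (Nat.pos_of_ne_zero (by assumption)) (by norm_num)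

def solLoopPos (number : Nat) (l r : Int) (moves : List String) : List String :=
  if number = 0 then moves
  else if number % 2 = 1 then solLoopPos (number / 2) l (2 * r - l) (moves ++ ["R"])
  else solLoopPos (number / 2) (2 * l - r) r (moves ++ ["L"])
decreasing_by all_goals exact Nat.div_lt_self (Nat.pos_of_ne_zero (by assumption)) (by norm_num)

def solution (N : Int) : Int :=
  if N = 0 ∨ N = 1 then 0
  else
    let moves :=
      if N ≤ 0 then solLoopNeg (-N).toNat 0 1 []
      else solLoopPos (N - 1).toNat 0 1 []
    if moves ≠ [] then (moves.length : Int) else -1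

-- ===== PORT B =====
-- Python's int.bit_length on a nonnegative argument.
def bitLen (n : Nat) : Nat :=
  if n = 0 then 0 else bitLen (n / 2) + 1
decreasing_by exact Nat.div_lt_self (Nat.pos_of_ne_zero (by assumption)) (by norm_num)

def solution_alt (N : Int) : Int :=
  if N ≤ 0 then (bitLen (-N).toNat : Int)
  else (bitLen (N - 1).toNat : Int)

-- ===== PRECONDITION & SPEC =====
def Spec_solution (N : Int) (out : Int) : Prop := out = solution_alt N
instance (N : Int) (out : Int) : Decidable (Spec_solution N out) := by unfold Spec_solution; infer_instance

-- ===== CLAIM (what is proved, stated in full; the proofs are below) =====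
def Claim_equal_solution : Prop := ∀ (N : Int), Dom_solution N → Spec_solution N (solution N)

-- ===== LEMMAS AND PROOFS =====

theorem solLoopNeg_length (number : Nat) : ∀ (l r : Int) (moves : List String),
    (solLoopNeg number l r moves).length = moves.length + bitLen number := by
  induction number using Nat.strong_induction_on with
  | _ n ih =>
    intro l r moves
    rw [solLoopNeg, bitLen]
    by_cases h : n = 0
    · simp [h]
    · have hlt := Nat.div_lt_self (Nat.pos_of_ne_zero h) (by norm_num : 1 < 2)
      by_cases hp : n % 2 = 1 <;> simp [h, hp, ih _ hlt] <;> omega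

theorem solLoopPos_length (number : Nat) : ∀ (l r : Int) (moves : List String),
    (solLoopPos number l r moves).length = moves.length + bitLen number := by
  induction number using Nat.strong_induction_on with
  | _ n ih =>
    intro l r moves
    rw [solLoopPos, bitLen]
    by_cases h : n = 0
    · simp [h]
    · have hlt := Nat.div_lt_self (Nat.pos_of_ne_zero h) (by norm_num : 1 < 2)
      by_cases hp : n % 2 = 1 <;> simp [h, hp, ih _ hlt] <;> omega

theorem bitLen_zero : bitLen 0 = 0 := by rw [bitLen]; simp

theorem bitLen_pos (n : Nat) (h : n ≠ 0) : 0 < bitLen n := by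
  rw [bitLen]; simp [h]

-- ===== VERDICT (by name: the statement is the Claim_ definition above) =====
theorem solution_spec : Claim_equal_solution := by
  intro N _
  unfold Spec_solution solution solution_alt
  by_cases h01 : N = 0 ∨ N = 1
  · rcases h01 with h | h <;> subst h <;> norm_num [bitLen_zero]
  · simp only [h01, if_false]
    by_cases hle : N ≤ 0
    · have hne : (-N).toNat ≠ 0 := by omega
      have hlen := solLoopNeg_length (-N).toNat 0 1 []
      have hpos := bitLen_pos _ hne
      have hnonempty : solLoopNeg (-N).toNat 0 1 [] ≠ [] := by
        intro he; rw [he] at hlen; simp only [List.length_nil] at hlen; omega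
      simp only [if_pos hle]
      rw [if_pos hnonempty, hlen]
      simp
    · have hne : (N - 1).toNat ≠ 0 := by omega
      have hlen := solLoopPos_length (N - 1).toNat 0 1 []
      have hpos := bitLen_pos _ hne
      have hnonempty : solLoopPos (N - 1).toNat 0 1 [] ≠ [] := by
        intro he; rw [he] at hlen; simp only [List.length_nil] at hlen; omega
      simp only [if_neg hle]
      rw [if_pos hnonempty, hlen]
      simp
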